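-- pv_equiv track=rewrite | github.com/patchangg/LeetCode | Python/Medium/1943.py | splitPainting
-- ===== SOURCE A (Python) =====
-- from collections import defaultdict
--
-- def splitPainting(segments):
--     mapping = defaultdict(int)
--     for start,end,colour in segments:
--         mapping[start] += colour
--         mapping[end] -= colour
--
--     prev = None
--     colour = 0
--     output = []
--     for segment in sorted(mapping):
--         if prev != None and colour > 0:
--             output.append((prev,segment,colour))
--         colour += mapping[segment]
--         prev = segment
--     return output
-- ===== SOURCE B (Python) =====
-- def splitPainting(segments):
--     points = set()
--     for start, end, colour in segments:
--         points.add(start)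
--         points.add(end)
--     points = sorted(points)
--
--     output = []
--     for left, right in zip(points, points[1:]):
--         total = 0
--         for start, end, colour in segments:
--             total += colour * ((start <= left) - (end <= left))
--         if total > 0:
--             output.append((left, right, total))
--     return output
-- ===== Notes on version B (the rewrite author's own statement) =====
-- stated objective: alternative
-- what changed: Replaces the defaultdict delta map and the stateful prefix-sum sweep by gathering the sorted distinct boundary points and recomputing each gap's colour with a direct signed-coverage scan over all segments.
import Mathlib
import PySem

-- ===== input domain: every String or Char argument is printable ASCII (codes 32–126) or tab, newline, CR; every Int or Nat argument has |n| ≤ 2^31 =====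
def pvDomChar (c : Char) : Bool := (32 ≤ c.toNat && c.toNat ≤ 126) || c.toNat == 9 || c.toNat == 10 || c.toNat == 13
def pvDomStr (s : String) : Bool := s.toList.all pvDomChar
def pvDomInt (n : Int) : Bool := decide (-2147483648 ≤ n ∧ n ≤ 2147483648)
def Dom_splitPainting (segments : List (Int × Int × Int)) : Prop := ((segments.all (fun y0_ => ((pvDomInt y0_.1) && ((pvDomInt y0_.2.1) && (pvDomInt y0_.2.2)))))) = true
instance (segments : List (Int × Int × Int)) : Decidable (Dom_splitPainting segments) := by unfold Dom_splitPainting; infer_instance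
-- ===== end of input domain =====

-- B is an alternative decomposition: sorted distinct boundary points + per-gap signed-coverage rescan,
-- instead of A's delta map and stateful sweep; same return value on every input.

-- ===== PORT A =====
-- mapping[start] += colour; mapping[end] -= colour  (defaultdict(int) = Dict.modify with default 0)
def pvBuildMap_splitPainting (segments : List (Int × Int × Int)) : PySem.Dict Int Int :=
  segments.foldl (fun d t => (d.modify t.1 0 (· + t.2.2)).modify t.2.1 0 (· - t.2.2)) PySem.Dict.empty

-- one iteration of A's sweep loop; state = (prev, colour, output)
def pvStepA_splitPainting (mapping : PySem.Dict Int Int)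
    (st : Option Int × Int × List (Int × Int × Int)) (segment : Int) :
    Option Int × Int × List (Int × Int × Int) :=
  let output := match st.1 with
    | some prev => if st.2.1 > 0 then st.2.2 ++ [(prev, segment, st.2.1)] else st.2.2
    | none => st.2.2
  (some segment, st.2.1 + mapping.getD segment 0, output)

def splitPainting (segments : List (Int × Int × Int)) : List (Int × Int × Int) :=
  let mapping := pvBuildMap_splitPainting segments
  ((PySem.List.sorted mapping.keys (fun x => x) false).foldl
    (pvStepA_splitPainting mapping) (none, 0, [])).2.2

-- ===== PORT B =====
-- total += colour * ((start <= left) - (end <= left))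
def pvGap_splitPainting (segments : List (Int × Int × Int)) (left : Int) : Int :=
  segments.foldl
    (fun total t =>
      total + t.2.2 * ((if t.1 ≤ left then (1 : Int) else 0) - (if t.2.1 ≤ left then (1 : Int) else 0)))
    0

def splitPainting_alt (segments : List (Int × Int × Int)) : List (Int × Int × Int) :=
  let points : PySem.Set Int :=
    segments.foldl (fun s t => PySem.Set.add (PySem.Set.add s t.1) t.2.1) PySem.Set.empty
  let pts := PySem.List.sorted points (fun x => x) false
  (pts.zip pts.tail).foldl
    (fun output lr =>
      let total := pvGap_splitPainting segments lr.1
      if total > 0 then output ++ [(lr.1, lr.2, total)] else output)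
    []

-- ===== PRECONDITION & SPEC =====
def Spec_splitPainting (segments : List (Int × Int × Int)) (out : List (Int × Int × Int)) : Prop := out = splitPainting_alt segments
instance (segments : List (Int × Int × Int)) (out : List (Int × Int × Int)) : Decidable (Spec_splitPainting segments out) := by unfold Spec_splitPainting; infer_instance

-- ===== CLAIM (what is proved, stated in full; the proofs are below) =====
def Claim_equal_splitPainting : Prop := ∀ (segments : List (Int × Int × Int)), Dom_splitPainting segments → Spec_splitPainting segments (splitPainting segments)

-- ===== LEMMAS AND PROOFS =====

-- delta contributed by one segment at point p (what A's mapping stores)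
def pvD (t : Int × Int × Int) (p : Int) : Int :=
  (if t.1 = p then t.2.2 else 0) - (if t.2.1 = p then t.2.2 else 0)

-- signed coverage of one segment over the gap starting at l (what B sums)
def pvG (t : Int × Int × Int) (l : Int) : Int :=
  t.2.2 * ((if t.1 ≤ l then (1 : Int) else 0) - (if t.2.1 ≤ l then (1 : Int) else 0))

-- B's gap-loop body, named for the proofs (identical to the lambda in splitPainting_alt)
def pvStepB (segments : List (Int × Int × Int)) (output : List (Int × Int × Int)) (lr : Int × Int) :
    List (Int × Int × Int) :=
  if pvGap_splitPainting segments lr.1 > 0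
  then output ++ [(lr.1, lr.2, pvGap_splitPainting segments lr.1)] else output

theorem pvBuildMap_getD (segments : List (Int × Int × Int)) (p : Int) :
    ∀ d : PySem.Dict Int Int,
      (segments.foldl (fun d t => (d.modify t.1 0 (· + t.2.2)).modify t.2.1 0 (· - t.2.2)) d).getD p 0
        = d.getD p 0 + (segments.map (pvD · p)).sum := by
  induction segments with
  | nil => intro d; simp
  | cons t rest ih =>
      intro d
      simp only [List.foldl_cons, ih, List.map_cons, List.sum_cons]
      simp only [PySem.Dict.getD_modify]
      unfold pvD
      split_ifs <;> subst_vars <;> simp_all <;> omega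

theorem pvGap_eq_sum (segments : List (Int × Int × Int)) (l : Int) :
    pvGap_splitPainting segments l = (segments.map (pvG · l)).sum := by
  have h : pvGap_splitPainting segments l = List.foldl (fun acc t => acc + pvG t l) 0 segments := rfl
  rw [h, PySem.List.foldl_add]
  simp


-- membership of the delta map's keys: exactly the segment endpoints
theorem pvBuildMap_mem_keys (segments : List (Int × Int × Int)) (k : Int) :
    ∀ d : PySem.Dict Int Int,
      (k ∈ (segments.foldl (fun d t => (d.modify t.1 0 (· + t.2.2)).modify t.2.1 0 (· - t.2.2)) d).keys
        ↔ k ∈ d.keys ∨ ∃ t ∈ segments, k = t.1 ∨ k = t.2.1) := by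
  induction segments with
  | nil => intro d; simp
  | cons t rest ih =>
      intro d
      simp only [List.foldl_cons, ih, PySem.Dict.keys_modify, PySem.Dict.mem_keys_insert,
        List.mem_cons]
      aesop

theorem pvBuildMap_nodup_keys (segments : List (Int × Int × Int)) :
    ∀ d : PySem.Dict Int Int, d.keys.Nodup →
      (segments.foldl (fun d t => (d.modify t.1 0 (· + t.2.2)).modify t.2.1 0 (· - t.2.2)) d).keys.Nodup := by
  induction segments with
  | nil => intro d h; simpa using h
  | cons t rest ih =>
      intro d h
      simp only [List.foldl_cons]
      apply ih
      rw [PySem.Dict.keys_modify]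
      apply PySem.Dict.nodup_keys_insert
      rw [PySem.Dict.keys_modify]
      exact PySem.Dict.nodup_keys_insert _ _ _ h

-- membership of B's boundary-point set
theorem pvPoints_mem (segments : List (Int × Int × Int)) (k : Int) :
    ∀ s : PySem.Set Int,
      (k ∈ segments.foldl (fun s t => PySem.Set.add (PySem.Set.add s t.1) t.2.1) s
        ↔ k ∈ s ∨ ∃ t ∈ segments, k = t.1 ∨ k = t.2.1) := by
  induction segments with
  | nil => intro s; simp
  | cons t rest ih =>
      intro s
      simp only [List.foldl_cons, ih, PySem.Set.mem_add, List.mem_cons]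
      aesop

theorem pvPoints_nodup (segments : List (Int × Int × Int)) :
    ∀ s : PySem.Set Int, s.Nodup →
      (segments.foldl (fun s t => PySem.Set.add (PySem.Set.add s t.1) t.2.1) s).Nodup := by
  induction segments with
  | nil => intro s h; simpa using h
  | cons t rest ih =>
      intro s h
      exact ih _ (PySem.Set.nodup_add _ _ (PySem.Set.nodup_add _ _ h))

-- A and B sort the same set of boundary points
theorem pvPts_eq (segments : List (Int × Int × Int)) :
    PySem.List.sorted (pvBuildMap_splitPainting segments).keys (fun x => x) false
      = PySem.List.sorted
          (segments.foldl (fun s t => PySem.Set.add (PySem.Set.add s t.1) t.2.1) PySem.Set.empty)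
          (fun x => x) false := by
  apply PySem.List.sorted_eq_sorted_of_perm _ _ _ (fun a b h => h)
  refine (List.perm_ext_iff_of_nodup
        (pvBuildMap_nodup_keys segments _ PySem.Dict.nodup_keys_empty)
        (pvPoints_nodup segments _ List.nodup_nil)).mpr ?_
  intro a
  rw [pvBuildMap_mem_keys, pvPoints_mem]
  simp [PySem.Dict.keys_empty]

-- the sorted distinct points are strictly increasing
theorem pvPts_lt (xs : List Int) (h : xs.Nodup) :
    (PySem.List.sorted xs (fun x => x) false).Pairwise (· < ·) := by
  have hle : (PySem.List.sorted xs (fun x => x) false).Pairwise (fun a b => a ≤ b) :=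
    PySem.List.sorted_pairwise xs (fun x => x)
  have hnd : (PySem.List.sorted xs (fun x => x) false).Nodup :=
    (PySem.List.sorted_perm xs (fun x => x) false).symm.nodup h
  exact (hle.and hnd).imp (fun hab => lt_of_le_of_ne hab.1 hab.2)

-- per-endpoint accounting: coverage at q plus the delta at the next point r = coverage at r
theorem pvPointStep (x c q r : Int) (hx : x ≤ q ∨ x = r ∨ r < x) (hqr : q < r) :
    c * (if x ≤ q then (1 : Int) else 0) + (if x = r then c else 0)
      = c * (if x ≤ r then (1 : Int) else 0) := by
  rcases hx with h | h | h <;> (split_ifs <;> simp_all <;> omega)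

theorem pvSegStep (t : Int × Int × Int) (q r : Int) (hqr : q < r)
    (h1 : t.1 ≤ q ∨ t.1 = r ∨ r < t.1) (h2 : t.2.1 ≤ q ∨ t.2.1 = r ∨ r < t.2.1) :
    pvG t q + pvD t r = pvG t r := by
  have hs := pvPointStep t.1 t.2.2 q r h1 hqr
  have he := pvPointStep t.2.1 t.2.2 q r h2 hqr
  unfold pvG pvD
  rw [mul_sub, mul_sub]
  linarith

theorem pvSumStep (segments : List (Int × Int × Int)) (q r : Int) (hqr : q < r)
    (h : ∀ t ∈ segments, (t.1 ≤ q ∨ t.1 = r ∨ r < t.1) ∧ (t.2.1 ≤ q ∨ t.2.1 = r ∨ r < t.2.1)) :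
    (segments.map (pvG · q)).sum + (segments.map (pvD · r)).sum = (segments.map (pvG · r)).sum := by
  induction segments with
  | nil => simp
  | cons t rest ih =>
      have ht := h t (by simp)
      have hstep := pvSegStep t q r hqr ht.1 ht.2
      have := ih (fun u hu => h u (by simp [hu]))
      simp only [List.map_cons, List.sum_cons]
      linarith

-- at the minimal point, the delta equals the coverage
theorem pvPointBase (x c p : Int) (hx : p ≤ x) :
    (if x = p then c else 0) = c * (if x ≤ p then (1 : Int) else 0) := by
  split_ifs <;> simp_all
  omega

theorem pvSumBase (segments : List (Int × Int × Int)) (p : Int)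
    (h : ∀ t ∈ segments, p ≤ t.1 ∧ p ≤ t.2.1) :
    (segments.map (pvD · p)).sum = (segments.map (pvG · p)).sum := by
  induction segments with
  | nil => simp
  | cons t rest ih =>
      have ht := h t (by simp)
      have hs := pvPointBase t.1 t.2.2 p ht.1
      have he := pvPointBase t.2.1 t.2.2 p ht.2
      have := ih (fun u hu => h u (by simp [hu]))
      simp only [List.map_cons, List.sum_cons]
      unfold pvG pvD
      rw [mul_sub]
      unfold pvG pvD at this
      linarith

-- B's gap loop: the accumulator only ever receives appends
theorem pvFoldOut (segments : List (Int × Int × Int)) (l : List (Int × Int)) :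
    ∀ acc : List (Int × Int × Int),
      l.foldl (pvStepB segments) acc = acc ++ l.foldl (pvStepB segments) [] := by
  induction l with
  | nil => intro acc; simp
  | cons x l ih =>
      intro acc
      simp only [List.foldl_cons]
      rw [ih (pvStepB segments acc x), ih (pvStepB segments [] x)]
      unfold pvStepB
      split <;> simp

-- A's sweep, started after the first point, produces B's gap list
theorem pvSweep (segments : List (Int × Int × Int)) :
    ∀ (rest : List Int) (q : Int) (out : List (Int × Int × Int)),
      ((q :: rest).Pairwise (· < ·)) →
      (∀ t ∈ segments, (t.1 ≤ q ∨ t.1 ∈ rest) ∧ (t.2.1 ≤ q ∨ t.2.1 ∈ rest)) →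
      (rest.foldl (pvStepA_splitPainting (pvBuildMap_splitPainting segments))
          (some q, (segments.map (pvG · q)).sum, out)).2.2
        = out ++ ((q :: rest).zip rest).foldl (pvStepB segments) [] := by
  intro rest
  induction rest with
  | nil => intro q out _ _; simp
  | cons r rest ih =>
      intro q out hpw hcond
      have hqr : q < r := (List.pairwise_cons.mp hpw).1 r (by simp)
      have hrrest : ∀ x ∈ rest, r < x := (List.pairwise_cons.mp (List.pairwise_cons.mp hpw).2).1
      have hg : (pvBuildMap_splitPainting segments).getD r 0 = (segments.map (pvD · r)).sum := by
        unfold pvBuildMap_splitPainting; rw [pvBuildMap_getD]; simp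
      have hcol : (segments.map (pvG · q)).sum + (pvBuildMap_splitPainting segments).getD r 0
          = (segments.map (pvG · r)).sum := by
        rw [hg]
        refine pvSumStep segments q r hqr (fun t ht => ⟨?_, ?_⟩)
        · rcases (hcond t ht).1 with h | h
          · exact Or.inl h
          · rcases List.mem_cons.mp h with rfl | h
            · exact Or.inr (Or.inl rfl)
            · exact Or.inr (Or.inr (hrrest _ h))
        · rcases (hcond t ht).2 with h | h
          · exact Or.inl h
          · rcases List.mem_cons.mp h with rfl | h
            · exact Or.inr (Or.inl rfl)
            · exact Or.inr (Or.inr (hrrest _ h))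
      have hcond' : ∀ t ∈ segments, (t.1 ≤ r ∨ t.1 ∈ rest) ∧ (t.2.1 ≤ r ∨ t.2.1 ∈ rest) := by
        intro t ht
        refine ⟨?_, ?_⟩
        · rcases (hcond t ht).1 with h | h
          · exact Or.inl (le_trans h hqr.le)
          · rcases List.mem_cons.mp h with rfl | h
            · exact Or.inl le_rfl
            · exact Or.inr h
        · rcases (hcond t ht).2 with h | h
          · exact Or.inl (le_trans h hqr.le)
          · rcases List.mem_cons.mp h with rfl | h
            · exact Or.inl le_rfl
            · exact Or.inr h
      have hstep : pvStepA_splitPainting (pvBuildMap_splitPainting segments)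
          (some q, (segments.map (pvG · q)).sum, out) r
          = (some r, (segments.map (pvG · r)).sum,
             if (segments.map (pvG · q)).sum > 0
             then out ++ [(q, r, (segments.map (pvG · q)).sum)] else out) := by
        simp only [pvStepA_splitPainting]
        rw [hcol]
      rw [List.foldl_cons, hstep,
          ih r _ (hpw.sublist (List.sublist_cons_self q _)) hcond',
          List.zip_cons_cons, List.foldl_cons,
          pvFoldOut segments ((r :: rest).zip rest) (pvStepB segments [] (q, r))]
      unfold pvStepB
      rw [pvGap_eq_sum]
      by_cases h : (segments.map (pvG · q)).sum > 0 <;> simp [h]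

theorem pvMain (segments : List (Int × Int × Int)) :
    splitPainting segments = splitPainting_alt segments := by
  simp only [splitPainting, splitPainting_alt, pvPts_eq segments]
  rcases hp : PySem.List.sorted
      (segments.foldl (fun s t => PySem.Set.add (PySem.Set.add s t.1) t.2.1) PySem.Set.empty)
      (fun x => x) false with _ | ⟨p, rest⟩
  · rw [hp]
    simp
  · have hlt : (p :: rest).Pairwise (· < ·) := by
      rw [← hp]
      exact pvPts_lt _ (pvPoints_nodup segments _ List.nodup_nil)
    have hmin : ∀ t ∈ segments, p ≤ t.1 ∧ p ≤ t.2.1 := by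
      intro t ht
      constructor
      · exact PySem.List.key_head_sorted_le _ _ hp t.1 ((pvPoints_mem segments t.1 _).mpr
          (Or.inr ⟨t, ht, Or.inl rfl⟩))
      · exact PySem.List.key_head_sorted_le _ _ hp t.2.1 ((pvPoints_mem segments t.2.1 _).mpr
          (Or.inr ⟨t, ht, Or.inr rfl⟩))
    have hmem : ∀ t ∈ segments, t.1 ∈ p :: rest ∧ t.2.1 ∈ p :: rest := by
      intro t ht
      constructor
      · rw [← hp, PySem.List.mem_sorted]
        exact (pvPoints_mem segments t.1 _).mpr (Or.inr ⟨t, ht, Or.inl rfl⟩)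
      · rw [← hp, PySem.List.mem_sorted]
        exact (pvPoints_mem segments t.2.1 _).mpr (Or.inr ⟨t, ht, Or.inr rfl⟩)
    have hcond : ∀ t ∈ segments, (t.1 ≤ p ∨ t.1 ∈ rest) ∧ (t.2.1 ≤ p ∨ t.2.1 ∈ rest) := by
      intro t ht
      constructor
      · rcases List.mem_cons.mp (hmem t ht).1 with h | h
        · exact Or.inl h.le
        · exact Or.inr h
      · rcases List.mem_cons.mp (hmem t ht).2 with h | h
        · exact Or.inl h.le
        · exact Or.inr h
    have hgp : (pvBuildMap_splitPainting segments).getD p 0 = (segments.map (pvG · p)).sum := by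
      unfold pvBuildMap_splitPainting
      rw [pvBuildMap_getD]
      simp only [PySem.Dict.getD_empty, zero_add]
      exact pvSumBase segments p hmin
    have hstep0 : pvStepA_splitPainting (pvBuildMap_splitPainting segments)
        (none, 0, ([] : List (Int × Int × Int))) p
        = (some p, (segments.map (pvG · p)).sum, []) := by
      simp only [pvStepA_splitPainting]
      rw [zero_add, hgp]
    rw [hp]
    simp only [List.tail_cons]
    rw [List.foldl_cons, hstep0, pvSweep segments rest p [] hlt hcond]
    rw [List.nil_append]
    rfl

theorem splitPainting_spec : Claim_equal_splitPainting := by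
  intro segments _
  unfold Spec_splitPainting
  exact pvMain segments
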